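-- pv_equiv track=rewrite | github.com/wmduggan41/Data-Mining | cpu_tests/Interactive/Compare3itemsets.py | get_C1
-- ===== SOURCE A (Python) =====
-- def get_C1(Transactions):
--     C1 = []
--     for itemsets in Transactions:
--         for item in itemsets:
--             if not [item] in C1:
--                 C1.append([item])
--     # sorting the candidates
--     C1.sort()
--     return C1
-- ===== SOURCE B (Python) =====
-- def get_C1(Transactions):
--     flat = []
--     for itemsets in Transactions:
--         flat.extend(itemsets)
--     flat.sort()
--     C1 = []
--     for item in flat:
--         if not C1 or C1[-1] != [item]:
--             C1.append([item])
--     return C1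
-- ===== Notes on version B (the rewrite author's own statement) =====
-- stated objective: faster
-- what changed: A repeatedly scans the growing candidate list for membership before appending and sorts at the end; B flattens all transactions into one list, sorts it once, and emits [item] in a single pass that skips adjacent duplicates.
import Mathlib
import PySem

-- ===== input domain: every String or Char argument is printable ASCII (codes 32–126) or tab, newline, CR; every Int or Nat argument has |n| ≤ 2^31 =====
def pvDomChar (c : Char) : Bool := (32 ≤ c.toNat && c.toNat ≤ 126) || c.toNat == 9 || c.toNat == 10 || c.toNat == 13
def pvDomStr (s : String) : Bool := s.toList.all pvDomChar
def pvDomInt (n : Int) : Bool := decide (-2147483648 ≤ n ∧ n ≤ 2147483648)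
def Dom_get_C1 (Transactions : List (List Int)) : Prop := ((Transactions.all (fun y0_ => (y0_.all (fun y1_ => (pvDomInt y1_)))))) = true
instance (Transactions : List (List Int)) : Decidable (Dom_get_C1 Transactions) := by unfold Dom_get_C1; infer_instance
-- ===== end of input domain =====

-- B flattens all transactions, sorts the flat list once, and emits singletons while
-- skipping adjacent duplicates, replacing A's repeated membership scans (measured faster).


-- ===== PORT A =====
def get_C1 (Transactions : List (List Int)) : List (List Int) :=
  let C1 := Transactions.foldl (fun C1 itemsets =>
    itemsets.foldl (fun C1 item =>
      if [item] ∈ C1 then C1 else C1 ++ [[item]]) C1) []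
  PySem.List.sorted C1 (fun x => x) false

-- ===== PORT B =====
def get_C1_alt (Transactions : List (List Int)) : List (List Int) :=
  let flat := Transactions.foldl (fun acc itemsets => acc ++ itemsets) []
  let sflat := PySem.List.sorted flat (fun x => x) false
  sflat.foldl (fun C1 item =>
    if C1 = [] ∨ C1.getLast? ≠ some [item] then C1 ++ [[item]] else C1) []

-- ===== PRECONDITION & SPEC =====
def Spec_get_C1 (Transactions : List (List Int)) (out : List (List Int)) : Prop := out = get_C1_alt Transactions
instance (Transactions : List (List Int)) (out : List (List Int)) : Decidable (Spec_get_C1 Transactions out) := by unfold Spec_get_C1; infer_instance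

-- ===== CLAIM (what is proved, stated in full; the proofs are below) =====
def Claim_equal_get_C1 : Prop := ∀ (Transactions : List (List Int)), Dom_get_C1 Transactions → Spec_get_C1 Transactions (get_C1 Transactions)

-- ===== LEMMAS AND PROOFS =====

/-- A's ordered-dedup loop, on bare items. -/
def ddA (seen : List Int) (l : List Int) : List Int :=
  l.foldl (fun s y => if y ∈ s then s else s ++ [y]) seen

/-- B's adjacent-duplicate compression, on bare items. -/
def compress : Option Int → List Int → List Int
  | _, [] => []
  | o, x :: xs => if o = some x then compress o xs else x :: compress (some x) xs

theorem ddA_nodup (l : List Int) : ∀ seen : List Int, seen.Nodup → (ddA seen l).Nodup := by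
  induction l with
  | nil => intro seen h; exact h
  | cons x xs ih =>
    intro seen h
    simp only [ddA, List.foldl_cons]
    by_cases hx : x ∈ seen
    · simpa [hx] using ih seen h
    · simpa [hx] using ih (seen ++ [x]) (by simp only [List.nodup_append]; exact ⟨h, by simp, by intro a ha b hb; simp at hb; subst hb; exact fun hax => hx (hax ▸ ha)⟩)

theorem ddA_mem (l : List Int) : ∀ (seen : List Int) (y : Int), y ∈ ddA seen l ↔ y ∈ seen ∨ y ∈ l := by
  induction l with
  | nil => intro seen y; simp [ddA]
  | cons x xs ih =>
    intro seen y
    simp only [ddA, List.foldl_cons]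
    by_cases hx : x ∈ seen
    · rw [if_pos hx]
      rw [show (List.foldl (fun s y => if y ∈ s then s else s ++ [y]) seen xs) = ddA seen xs from rfl, ih]
      constructor
      · rintro (h | h)
        · exact Or.inl h
        · exact Or.inr (List.mem_cons_of_mem _ h)
      · rintro (h | h)
        · exact Or.inl h
        · rcases List.mem_cons.mp h with rfl | h
          · exact Or.inl hx
          · exact Or.inr h
    · rw [if_neg hx]
      rw [show (List.foldl (fun s y => if y ∈ s then s else s ++ [y]) (seen ++ [x]) xs) = ddA (seen ++ [x]) xs from rfl, ih]
      simp only [List.mem_append, List.mem_cons]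
      tauto

theorem compress_sorted_some :
    ∀ (l : List Int), l.Pairwise (· ≤ ·) → ∀ p : Int, (∀ y ∈ l, p ≤ y) →
      (compress (some p) l).Pairwise (· < ·) ∧
      (∀ y : Int, y ∈ compress (some p) l ↔ y ∈ l ∧ p < y) := by
  intro l
  induction l with
  | nil => intro _ p _; simp [compress]
  | cons x xs ih =>
    intro hpw p hp
    have hx : p ≤ x := hp x List.mem_cons_self
    have hxs : ∀ y ∈ xs, x ≤ y := fun y hy => (List.pairwise_cons.mp hpw).1 y hy
    have hpw' : xs.Pairwise (· ≤ ·) := (List.pairwise_cons.mp hpw).2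
    by_cases he : p = x
    · subst he
      have h := ih hpw' p hxs
      constructor
      · simpa [compress] using h.1
      · intro y
        rw [show compress (some p) (p :: xs) = compress (some p) xs by simp [compress]]
        rw [h.2 y]
        simp only [List.mem_cons]
        constructor
        · rintro ⟨hy, hlt⟩; exact ⟨Or.inr hy, hlt⟩
        · rintro ⟨hy | hy, hlt⟩
          · exact absurd hlt (by simp [hy])
          · exact ⟨hy, hlt⟩
    · have hlt : p < x := lt_of_le_of_ne hx he
      have h := ih hpw' x hxs
      have hc : compress (some p) (x :: xs) = x :: compress (some x) xs := by
        simp only [compress, Option.some_inj]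
        rw [if_neg he]
      constructor
      · rw [hc, List.pairwise_cons]
        refine ⟨fun y hy => ((h.2 y).mp hy).2, h.1⟩
      · intro y
        rw [hc]
        simp only [List.mem_cons, h.2 y]
        constructor
        · rintro (rfl | ⟨hy, hxy⟩)
          · exact ⟨Or.inl rfl, hlt⟩
          · exact ⟨Or.inr hy, lt_trans hlt hxy⟩
        · rintro ⟨rfl | hy, hpy⟩
          · exact Or.inl rfl
          · rcases lt_or_eq_of_le (hxs y hy) with h' | rfl
            · exact Or.inr ⟨hy, h'⟩
            · exact Or.inl rfl

theorem compress_sorted_none (l : List Int) (hpw : l.Pairwise (· ≤ ·)) :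
    (compress none l).Pairwise (· < ·) ∧ (∀ y : Int, y ∈ compress none l ↔ y ∈ l) := by
  cases l with
  | nil => simp [compress]
  | cons x xs =>
    have hxs : ∀ y ∈ xs, x ≤ y := fun y hy => (List.pairwise_cons.mp hpw).1 y hy
    have h := compress_sorted_some xs (List.pairwise_cons.mp hpw).2 x hxs
    have hc : compress none (x :: xs) = x :: compress (some x) xs := by simp [compress]
    rw [hc]
    constructor
    · rw [List.pairwise_cons]
      exact ⟨fun y hy => ((h.2 y).mp hy).2, h.1⟩
    · intro y
      simp only [List.mem_cons, h.2 y]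
      constructor
      · rintro (rfl | ⟨hy, _⟩)
        · exact Or.inl rfl
        · exact Or.inr hy
      · rintro (rfl | hy)
        · exact Or.inl rfl
        · rcases lt_or_eq_of_le (hxs y hy) with h' | rfl
          · exact Or.inr ⟨hy, h'⟩
          · exact Or.inl rfl

/-- B's flattening loop is `flatten`. -/
theorem foldl_append_flatten (l : List (List Int)) :
    ∀ acc : List Int, l.foldl (fun acc xs => acc ++ xs) acc = acc ++ l.flatten := by
  induction l with
  | nil => intro acc; simp
  | cons x xs ih => intro acc; simp [ih]

/-- A's nested loop is the dedup loop over the flattened items, mapped to singletons. -/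
theorem A_fold_eq (l : List Int) :
    ∀ seen : List Int,
      l.foldl (fun C1 item => if [item] ∈ C1 then C1 else C1 ++ [[item]])
        (seen.map (fun x => [x])) = (ddA seen l).map (fun x => [x]) := by
  induction l with
  | nil => intro seen; simp [ddA]
  | cons x xs ih =>
    intro seen
    have hmem : ([x] ∈ seen.map (fun x => [x])) ↔ x ∈ seen := by
      simp [List.mem_map]
    simp only [List.foldl_cons, ddA, List.foldl_cons]
    by_cases hx : x ∈ seen
    · rw [if_pos (hmem.mpr hx), if_pos hx]; exact ih seen
    · rw [if_neg (fun h => hx (hmem.mp h)), if_neg hx]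
      have : seen.map (fun x => [x]) ++ [[x]] = (seen ++ [x]).map (fun x => [x]) := by simp
      rw [this]; exact ih (seen ++ [x])

/-- B's emission loop is `compress`, mapped to singletons. -/
theorem B_fold_eq (l : List Int) :
    ∀ (acc : List (List Int)) (o : Option Int), acc.getLast? = o.map (fun x => [x]) →
      l.foldl (fun C1 item =>
        if C1 = [] ∨ C1.getLast? ≠ some [item] then C1 ++ [[item]] else C1) acc
      = acc ++ (compress o l).map (fun x => [x]) := by
  induction l with
  | nil => intro acc o _; simp [compress]
  | cons x xs ih =>
    intro acc o hlast
    simp only [List.foldl_cons]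
    by_cases ho : o = some x
    · subst ho
      have hne : ¬(acc = [] ∨ acc.getLast? ≠ some [x]) := by
        simp [hlast]
        intro h; subst h; simp at hlast
      rw [if_neg hne, ih acc (some x) hlast]
      simp [compress]
    · have hne : acc = [] ∨ acc.getLast? ≠ some [x] := by
        cases o with
        | none =>
          right; rw [hlast]; simp
        | some p =>
          right; rw [hlast]
          simp only [Option.map_some, ne_eq, Option.some_inj]
          intro h
          exact ho (by rw [List.cons_eq_cons.mp h |>.1])
      rw [if_pos hne, ih (acc ++ [[x]]) (some x) (by simp)]
      have hc : compress o (x :: xs) = x :: compress (some x) xs := by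
        simp [compress, ho]
      rw [hc]; simp

theorem singleton_lt (a b : Int) (h : a < b) : ([a] : List Int) < [b] := by
  simp [List.cons_lt_cons_iff, h]

-- ===== VERDICT (by name: the statement is the Claim_ definition above) =====
theorem get_C1_spec : Claim_equal_get_C1 := by
  intro T _
  unfold Spec_get_C1 get_C1 get_C1_alt
  simp only
  rw [foldl_append_flatten T []]
  simp only [List.nil_append]
  set flat := T.flatten with hflat
  set s := PySem.List.sorted flat (fun x => x) false with hs
  have hApw : s.Pairwise (fun a b => a ≤ b) := PySem.List.sorted_pairwise flat (fun x => x)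
  have hcomp := compress_sorted_none s hApw
  -- A's inner double fold
  have hA : T.foldl (fun C1 itemsets =>
      itemsets.foldl (fun C1 item => if [item] ∈ C1 then C1 else C1 ++ [[item]]) C1) []
      = (ddA [] flat).map (fun x => [x]) := by
    rw [← List.foldl_flatten (L := T)
      (f := fun C1 item => if [item] ∈ C1 then C1 else C1 ++ [[item]]) (b := [])]
    have := A_fold_eq flat []
    simpa using this
  rw [hA]
  -- B's fold
  rw [B_fold_eq s [] none (by simp)]
  simp only [List.nil_append]
  -- the sort
  have hperm : (List.map (fun x => [x]) (compress none s)).Perm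
      (List.map (fun x => [x]) (ddA [] flat)) := by
    apply List.Perm.map
    apply (List.perm_ext_iff_of_nodup ?_ ?_).mpr
    · intro y
      rw [hcomp.2 y, ddA_mem]
      rw [hs, PySem.List.mem_sorted]
      simp
    · exact hcomp.1.imp ne_of_lt
    · exact ddA_nodup flat [] List.nodup_nil
  have hpw : (List.map (fun x => [x]) (compress none s)).Pairwise
      (fun a b : List Int => a < b) :=
    List.Pairwise.map _ (fun {a b} h => singleton_lt a b h) hcomp.1
  have h := PySem.List.sorted_eq_of_perm_of_pairwise_lt
    (List.map (fun x => [x]) (ddA [] flat)) (List.map (fun x => [x]) (compress none s))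
    (fun x => x) hperm hpw
  convert h using 2
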